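-- pv_equiv track=rewrite | github.com/cantian114514/Artificial-intelligence | 实验/源码/lab2/homework3_2.py | get_train_example
-- ===== SOURCE A (Python) =====
-- tail=["(x,y)","(x,z)","(y,x)","(y,z)","(z,x)","(z,y)"]
--
-- def get_train_example(bk:list,goal:str): #得到前提约束谓词集
--     have_use=[]
--     ans=[]
--     goal_head=goal[:goal.find("(")]
--     for i in range(0,len(bk)):
--         head=bk[i][:bk[i].find("(")]
--         if head!=goal_head:
--             if len(have_use)==0 or have_use.count(head)==0:
--                 have_use.append(head)
--                 for j in range(0,6):
--                     t=str(head+tail[j])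
--                     ans.append(t)
--     return ans
-- ===== SOURCE B (Python) =====
-- tail=["(x,y)","(x,z)","(y,x)","(y,z)","(z,x)","(z,y)"]
--
-- def get_train_example(bk, goal):
--     goal_head = goal[:goal.find("(")]
--     rest = [s[:s.find("(")] for s in bk]
--     ans = []
--     while rest:
--         h = rest.pop()
--         if h != goal_head and h not in rest:
--             ans = [h + t for t in tail] + ans
--     return ans
-- ===== Notes on version B (the rewrite author's own statement) =====
-- stated objective: alternative
-- what changed: A scans forward keeping a have_use list of already-emitted heads and appends six strings per fresh head; B instead consumes the head list BACK-TO-FRONT with pop(), keeps a head exactly when it no longer occurs in the remaining prefix (last-copy-is-first-occurrence test, no seen-set at all), and builds the answer by prepending blocks, so the output is assembled in reverse.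
import Mathlib
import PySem

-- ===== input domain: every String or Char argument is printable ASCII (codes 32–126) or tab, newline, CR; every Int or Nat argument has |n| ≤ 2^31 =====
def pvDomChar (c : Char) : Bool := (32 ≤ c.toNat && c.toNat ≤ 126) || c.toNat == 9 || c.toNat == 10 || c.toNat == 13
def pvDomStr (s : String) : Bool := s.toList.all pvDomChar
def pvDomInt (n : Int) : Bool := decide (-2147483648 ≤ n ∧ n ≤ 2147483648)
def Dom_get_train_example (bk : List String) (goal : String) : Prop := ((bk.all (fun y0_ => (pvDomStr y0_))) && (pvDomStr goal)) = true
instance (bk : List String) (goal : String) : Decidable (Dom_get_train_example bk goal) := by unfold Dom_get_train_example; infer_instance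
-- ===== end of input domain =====

-- B replaces A's forward scan with a have_use dedup list by a backwards pop() loop that keeps a
-- head iff it no longer occurs in the remaining prefix, prepending six-string blocks; same value.

def pvTail : List String := ["(x,y)", "(x,z)", "(y,x)", "(y,z)", "(z,x)", "(z,y)"]

-- ===== PORT A =====
def get_train_example (bk : List String) (goal : String) : List String :=
  let goal_head := PySem.Str.slice goal none (some (PySem.Str.find goal "("))
  let st := (PySem.List.pyRange 0 (PySem.List.len bk) 1).foldl
    (fun (st : List String × List String) i =>
      let s := PySem.List.pyGetD bk i ""
      let head := PySem.Str.slice s none (some (PySem.Str.find s "("))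
      if head ≠ goal_head then
        if st.1.length = 0 ∨ PySem.List.count st.1 head = 0 then
          (st.1 ++ [head],
           (PySem.List.pyRange 0 6 1).foldl
             (fun ans j => ans ++ [head ++ PySem.List.pyGetD pvTail j ""]) st.2)
        else st
      else st) ([], [])
  st.2

-- ===== PORT B =====
-- the 'while rest: h = rest.pop(); if h != goal_head and h not in rest: ans = [...] + ans' loop
def pvWhileB (gh : String) (rest : List String) (ans : List String) : List String :=
  match hp : PySem.List.pop? rest (-1) with
  | none => ans
  | some (h, rest') =>
      pvWhileB gh rest'
        (if h ≠ gh ∧ h ∉ rest' then pvTail.map (fun t => h ++ t) ++ ans else ans)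
termination_by rest.length
decreasing_by
  have h2 := PySem.List.length_of_pop?_eq_some rest hp
  simp only [] at h2; omega

def get_train_example_alt (bk : List String) (goal : String) : List String :=
  let goal_head := PySem.Str.slice goal none (some (PySem.Str.find goal "("))
  let rest := bk.map (fun s => PySem.Str.slice s none (some (PySem.Str.find s "(")))
  pvWhileB goal_head rest []

-- ===== PRECONDITION & SPEC =====
def Spec_get_train_example (bk : List String) (goal : String) (out : List String) : Prop := out = get_train_example_alt bk goal
instance (bk : List String) (goal : String) (out : List String) : Decidable (Spec_get_train_example bk goal out) := by unfold Spec_get_train_example; infer_instance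

-- ===== CLAIM (what is proved, stated in full; the proofs are below) =====
def Claim_equal_get_train_example : Prop := ∀ (bk : List String) (goal : String), Dom_get_train_example bk goal → Spec_get_train_example bk goal (get_train_example bk goal)

-- ===== LEMMAS AND PROOFS =====

-- head s = s[:s.find("(")]
def pvHd (s : String) : String := PySem.Str.slice s none (some (PySem.Str.find s "("))
-- the six strings appended for one fresh head
def pvSix (h : String) : List String := pvTail.map (fun t => h ++ t)
-- A's loop body, with the inner range(0,6) loop already summed up into pvSix
def pvF (g : String) (st : List String × List String) (s : String) : List String × List String :=
  let head := pvHd s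
  if head ≠ g then
    if st.1.length = 0 ∨ PySem.List.count st.1 head = 0 then
      (st.1 ++ [head], st.2 ++ pvSix head)
    else st
  else st

-- A's inner 'for j in range(0,6)' loop appends exactly pvSix head
theorem pvInner (h : String) (ans : List String) :
    (PySem.List.pyRange 0 6 1).foldl
      (fun ans j => ans ++ [h ++ PySem.List.pyGetD pvTail j ""]) ans = ans ++ pvSix h := by
  have e : PySem.List.pyRange 0 6 1 = [0,1,2,3,4,5] := by decide
  rw [e]
  simp [pvSix, pvTail, PySem.List.pyGetD, PySem.List.pyGet?, PySem.List.pyIdx?]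

-- ordered dedup commutes with filter
theorem pvOfListFilter {α : Type} [DecidableEq α] (xs : List α) (p : α → Bool) :
    PySem.Set.ofList (xs.filter p) = (PySem.Set.ofList xs).filter p := by
  induction xs using List.reverseRecOn with
  | nil => rfl
  | append_singleton xs x ih =>
    rw [List.filter_append, PySem.Set.ofList_append_singleton]
    by_cases hp : p x = true
    · have : List.filter p [x] = [x] := by simp [hp]
      rw [this, PySem.Set.ofList_append_singleton]
      by_cases hm : x ∈ PySem.Set.ofList xs
      · have hm' : x ∈ PySem.Set.ofList (xs.filter p) := by
          rw [PySem.Set.mem_ofList] at *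
          exact List.mem_filter.mpr ⟨hm, hp⟩
        simp [PySem.Set.add, PySem.Set.contains, hm, ih, hp]
      · have hm' : x ∉ PySem.Set.ofList (xs.filter p) := by
          rw [PySem.Set.mem_ofList] at *
          exact fun hx => hm (List.mem_filter.mp hx).1
        simp [PySem.Set.add, PySem.Set.contains, hm, ih, List.filter_append, hp]
    · have : List.filter p [x] = [] := by simp [hp]
      rw [this, List.append_nil, ih]
      simp only [Bool.not_eq_true] at hp
      simp only [PySem.Set.add, PySem.Set.contains_eq_listContains, List.contains_eq_mem,
        decide_eq_true_eq]
      split_ifs with hm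
      · rfl
      · simp [List.filter_append, hp]

-- invariant of A's main loop
theorem pvLoopA (g : String) : ∀ (bk hu ans : List String),
    bk.foldl (pvF g) (hu, ans)
      = (PySem.Set.update hu ((bk.map pvHd).filter (fun h => decide ¬(h = g))),
         ans ++ ((PySem.Set.update hu ((bk.map pvHd).filter (fun h => decide ¬(h = g)))).drop hu.length).flatMap pvSix) := by
  intro bk
  induction bk with
  | nil => intro hu ans; simp [PySem.Set.update]
  | cons s bk ih =>
    intro hu ans
    by_cases hg : pvHd s = g
    · have hstep : pvF g (hu, ans) s = (hu, ans) := by simp [pvF, hg]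
      simp only [List.foldl_cons, hstep, List.map_cons, List.filter_cons, hg]
      simp [ih hu ans]
    · have hfil : (List.filter (fun h => decide ¬(h = g)) (pvHd s :: bk.map pvHd))
          = pvHd s :: (bk.map pvHd).filter (fun h => decide ¬(h = g)) := by
        simp [hg]
      by_cases hm : pvHd s ∈ hu
      · have hne : hu ≠ [] := List.ne_nil_of_mem hm
        have hstep : pvF g (hu, ans) s = (hu, ans) := by
          simp only [pvF, PySem.List.count_eq, ne_eq, hg, not_false_iff, if_true]
          rw [if_neg]
          rintro (h | h)
          · exact hne (List.length_eq_zero_iff.mp h)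
          · exact (List.count_eq_zero.mp h) hm
        have hadd : PySem.Set.add hu (pvHd s) = hu := by
          simp [PySem.Set.add, hm]
        simp only [List.foldl_cons, hstep, List.map_cons, hfil,
          PySem.Set.update_cons, hadd]
        exact ih hu ans
      · have hcond : hu.length = 0 ∨ PySem.List.count hu (pvHd s) = 0 := by
          right; rw [PySem.List.count_eq]; exact List.count_eq_zero.mpr hm
        have hstep : pvF g (hu, ans) s = (hu ++ [pvHd s], ans ++ pvSix (pvHd s)) := by
          simp only [pvF, ne_eq, hg, not_false_iff, if_true, if_pos hcond]
        have hadd : PySem.Set.add hu (pvHd s) = hu ++ [pvHd s] := by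
          simp [PySem.Set.add, hm]
        simp only [List.foldl_cons, hstep, List.map_cons, hfil,
          PySem.Set.update_cons, hadd]
        rw [ih (hu ++ [pvHd s]) (ans ++ pvSix (pvHd s))]
        refine Prod.ext_iff.mpr ⟨rfl, ?_⟩
        simp only
        rw [PySem.Set.update_eq_append_filter]
        set F := (PySem.Set.ofList ((bk.map pvHd).filter (fun h => decide ¬(h = g)))).filter
            (fun y => !(PySem.Set.contains (hu ++ [pvHd s]) y)) with hF
        have e1 : (hu ++ [pvHd s] ++ F).drop hu.length = pvHd s :: F := by
          rw [List.append_assoc, List.drop_append_of_le_length (by simp), List.drop_length]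
          simp
        have e2 : (hu ++ [pvHd s] ++ F).drop (hu ++ [pvHd s]).length = F := by
          rw [List.drop_left]
        rw [e1, e2]
        simp [List.flatMap_cons]

-- one step of B's loop, popping the last element
theorem pvWhileB_append (gh x : String) (hs ans : List String) :
    pvWhileB gh (hs ++ [x]) ans
      = pvWhileB gh hs (if x ≠ gh ∧ x ∉ hs then pvSix x ++ ans else ans) := by
  conv_lhs => unfold pvWhileB
  rw [PySem.List.pop?_last]
  rfl

theorem pvWhileB_nil (gh : String) (ans : List String) : pvWhileB gh [] ans = ans := by
  conv_lhs => unfold pvWhileB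
  rfl

-- B's loop equals: six strings for each first-occurring non-goal head, prepended to ans
theorem pvLoopB (gh : String) : ∀ (hs ans : List String),
    pvWhileB gh hs ans
      = ((PySem.Set.ofList hs).filter (fun h => decide ¬(h = gh))).flatMap pvSix ++ ans := by
  intro hs
  induction hs using List.reverseRecOn with
  | nil => intro ans; rw [pvWhileB_nil]; rfl
  | append_singleton hs x ih =>
    intro ans
    rw [pvWhileB_append, PySem.Set.ofList_append_singleton]
    by_cases hm : x ∈ hs
    · have hm' : x ∈ PySem.Set.ofList hs := (PySem.Set.mem_ofList hs x).mpr hm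
      have hadd : PySem.Set.add (PySem.Set.ofList hs) x = PySem.Set.ofList hs := by
        simp [PySem.Set.add, PySem.Set.contains, hm']
      rw [hadd, if_neg (by simp [hm]), ih]
    · have hm' : x ∉ PySem.Set.ofList hs := fun h => hm ((PySem.Set.mem_ofList hs x).mp h)
      have hadd : PySem.Set.add (PySem.Set.ofList hs) x = PySem.Set.ofList hs ++ [x] := by
        simp [PySem.Set.add, PySem.Set.contains, hm']
      rw [hadd, List.filter_append]
      by_cases hg : x = gh
      · rw [if_neg (by simp [hg]), ih]
        simp [hg]
      · rw [if_pos ⟨hg, hm⟩, ih]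
        simp [hg]

-- ===== VERDICT (by name: the statement is the Claim_ definition above) =====
theorem get_train_example_spec : Claim_equal_get_train_example := by
  intro bk goal _
  show get_train_example bk goal = get_train_example_alt bk goal
  unfold get_train_example get_train_example_alt
  simp only
  have eA : (fun (st : List String × List String) (i : Int) =>
      let s := PySem.List.pyGetD bk i ""
      let head := PySem.Str.slice s none (some (PySem.Str.find s "("))
      if head ≠ pvHd goal then
        if st.1.length = 0 ∨ PySem.List.count st.1 head = 0 then
          (st.1 ++ [head],
           (PySem.List.pyRange 0 6 1).foldl
             (fun ans j => ans ++ [head ++ PySem.List.pyGetD pvTail j ""]) st.2)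
        else st
      else st)
      = (fun st i => pvF (pvHd goal) st (PySem.List.pyGetD bk i "")) := by
    funext st i
    simp only [pvF, pvHd, pvInner]
  rw [show PySem.Str.slice goal none (some (PySem.Str.find goal "(")) = pvHd goal from rfl, eA,
    PySem.List.foldl_pyRange_zero_pyGetD bk "" (pvF (pvHd goal)) ([], []),
    pvLoopA (pvHd goal) bk [] []]
  rw [show (bk.map fun s => PySem.Str.slice s none (some (PySem.Str.find s "("))) = bk.map pvHd from rfl,
    pvLoopB (pvHd goal) (bk.map pvHd) []]
  simp only [List.nil_append, List.length_nil, List.drop_zero, List.append_nil]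
  rw [PySem.Set.update_nil_left, pvOfListFilter]
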